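-- pv_equiv track=rewrite | github.com/Odiin2024/flashboss-site | scripts/pull_corrections.py | filter_reports
-- ===== SOURCE A (Python) =====
-- def filter_reports(reports, issue_type=None, language_pack=None, pending_only=False):
--     """Filter reports by criteria."""
--     filtered = reports
--
--     if issue_type:
--         filtered = [r for r in filtered if issue_type.lower() in r['issue_type'].lower()]
--
--     if language_pack:
--         filtered = [r for r in filtered if language_pack.lower() in r['language_pack'].lower()]
--
--     if pending_only:
--         filtered = [r for r in filtered if not r['status'] or r['status'].lower() == 'pending']
--
--     return filtered
-- ===== SOURCE B (Python) =====
-- def filter_reports(reports, issue_type=None, language_pack=None, pending_only=False):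
--     """Filter reports by criteria in one fused pass instead of three sequential list passes."""
--     return [
--         r for r in reports
--         if (not issue_type or issue_type.lower() in r['issue_type'].lower())
--         and (not language_pack or language_pack.lower() in r['language_pack'].lower())
--         and (not pending_only or not r['status'] or r['status'].lower() == 'pending')
--     ]
-- ===== Notes on version B (the rewrite author's own statement) =====
-- stated objective: alternative
-- what changed: Three sequential filtering passes (one intermediate list per active criterion) are fused into a single pass over reports whose predicate ANDs the three guarded, short-circuiting conditions.
import Mathlib
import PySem

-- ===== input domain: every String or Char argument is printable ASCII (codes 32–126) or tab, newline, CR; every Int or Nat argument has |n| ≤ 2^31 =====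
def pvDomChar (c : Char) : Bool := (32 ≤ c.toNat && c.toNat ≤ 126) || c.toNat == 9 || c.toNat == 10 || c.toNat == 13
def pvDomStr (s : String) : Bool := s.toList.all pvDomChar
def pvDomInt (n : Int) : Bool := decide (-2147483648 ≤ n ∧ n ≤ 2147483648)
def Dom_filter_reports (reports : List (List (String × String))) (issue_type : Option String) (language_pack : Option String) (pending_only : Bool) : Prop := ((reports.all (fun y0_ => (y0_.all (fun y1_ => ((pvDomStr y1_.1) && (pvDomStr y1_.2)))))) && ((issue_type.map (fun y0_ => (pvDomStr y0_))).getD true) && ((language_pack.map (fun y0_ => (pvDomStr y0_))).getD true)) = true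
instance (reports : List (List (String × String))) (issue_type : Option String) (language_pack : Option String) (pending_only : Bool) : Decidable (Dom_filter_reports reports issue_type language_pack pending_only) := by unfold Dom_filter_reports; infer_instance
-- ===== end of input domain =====

-- B fuses A's three sequential filtering passes into one pass with a single ANDed predicate (objective: alternative decomposition, same O(n) cost).

-- ===== PORT A =====
-- r[k] on the report dict; missing key is a KeyError in Python, excluded by Pre_ (the "" default is never claimed about)
def pyLookup (r : List (String × String)) (k : String) : String :=
  ((r.find? (fun p => p.1 == k)).map (·.2)).getD ""

-- Python truthiness of an optional string parameter: not None and not ""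
def truthy : Option String → Bool
  | none => false
  | some s => s != ""

def filter_reports (reports : List (List (String × String))) (issue_type : Option String) (language_pack : Option String) (pending_only : Bool) : List (List (String × String)) :=
  let filtered := reports
  let filtered := if truthy issue_type then
      filtered.filter (fun r => PySem.Str.isIn (PySem.Str.lower (issue_type.getD "")) (PySem.Str.lower (pyLookup r "issue_type")))
    else filtered
  let filtered := if truthy language_pack then
      filtered.filter (fun r => PySem.Str.isIn (PySem.Str.lower (language_pack.getD "")) (PySem.Str.lower (pyLookup r "language_pack")))
    else filtered
  let filtered := if pending_only then
      filtered.filter (fun r => (pyLookup r "status" == "") || (PySem.Str.lower (pyLookup r "status") == "pending"))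
    else filtered
  filtered

-- ===== PORT B =====
-- the fused per-report predicate of Source B
def keepReport (issue_type : Option String) (language_pack : Option String) (pending_only : Bool) (r : List (String × String)) : Bool :=
  (!truthy issue_type || PySem.Str.isIn (PySem.Str.lower (issue_type.getD "")) (PySem.Str.lower (pyLookup r "issue_type")))
  && (!truthy language_pack || PySem.Str.isIn (PySem.Str.lower (language_pack.getD "")) (PySem.Str.lower (pyLookup r "language_pack")))
  && (!pending_only || (pyLookup r "status" == "") || (PySem.Str.lower (pyLookup r "status") == "pending"))

def filter_reports_alt (reports : List (List (String × String))) (issue_type : Option String) (language_pack : Option String) (pending_only : Bool) : List (List (String × String)) :=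
  reports.filter (keepReport issue_type language_pack pending_only)

-- ===== PRECONDITION & SPEC =====
-- does the report dict have the key? (a missing key is a KeyError in Python)
def hasKey (r : List (String × String)) (k : String) : Bool := (r.find? (fun p => p.1 == k)).isSome
-- per-element criteria, used only to state on WHICH elements a later criterion's key is actually read
def passIssue (issue_type : Option String) (r : List (String × String)) : Bool :=
  !truthy issue_type || PySem.Str.isIn (PySem.Str.lower (issue_type.getD "")) (PySem.Str.lower (pyLookup r "issue_type"))
def passLang (language_pack : Option String) (r : List (String × String)) : Bool :=
  !truthy language_pack || PySem.Str.isIn (PySem.Str.lower (language_pack.getD "")) (PySem.Str.lower (pyLookup r "language_pack"))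
-- Pre_ excludes exactly the inputs on which A raises KeyError: an active criterion's key is missing from a report
-- that the earlier active criteria did not already reject (each conjunct is a per-element check on the input).
def Pre_filter_reports (reports : List (List (String × String))) (issue_type : Option String) (language_pack : Option String) (pending_only : Bool) : Prop :=
  (truthy issue_type = true → ∀ r ∈ reports, hasKey r "issue_type")
  ∧ (truthy language_pack = true → ∀ r ∈ reports, passIssue issue_type r = true → hasKey r "language_pack")
  ∧ (pending_only = true → ∀ r ∈ reports, passIssue issue_type r = true → passLang language_pack r = true → hasKey r "status")
instance (reports : List (List (String × String))) (issue_type : Option String) (language_pack : Option String) (pending_only : Bool) : Decidable (Pre_filter_reports reports issue_type language_pack pending_only) := by unfold Pre_filter_reports; infer_instance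

def pvWitness_filter_reports : (List (List (String × String))) × Option String × Option String × Bool :=
  ([[("issue_type", "Typo"), ("language_pack", "EN"), ("status", "")],
    [("issue_type", "grammar"), ("language_pack", "fr"), ("status", "Done")]], some "typo", some "en", true)

def Spec_filter_reports (reports : List (List (String × String))) (issue_type : Option String) (language_pack : Option String) (pending_only : Bool) (out : List (List (String × String))) : Prop := out = filter_reports_alt reports issue_type language_pack pending_only
instance (reports : List (List (String × String))) (issue_type : Option String) (language_pack : Option String) (pending_only : Bool) (out : List (List (String × String))) : Decidable (Spec_filter_reports reports issue_type language_pack pending_only out) := by unfold Spec_filter_reports; infer_instance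

-- ===== CLAIM (what is proved, stated in full; the proofs are below) =====
def Claim_equal_filter_reports : Prop := ∀ (reports : List (List (String × String))) (issue_type : Option String) (language_pack : Option String) (pending_only : Bool), Dom_filter_reports reports issue_type language_pack pending_only → Pre_filter_reports reports issue_type language_pack pending_only → Spec_filter_reports reports issue_type language_pack pending_only (filter_reports reports issue_type language_pack pending_only)

-- ===== LEMMAS AND PROOFS =====
theorem filter_and {α : Type} (p q : α → Bool) (l : List α) :
    (l.filter p).filter q = l.filter (fun a => p a && q a) := by
  induction l with
  | nil => rfl
  | cons x xs ih =>
    cases hp : p x <;> cases hq : q x <;>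
      simp [hp, hq, ih, -List.filter_filter]

theorem filter_of_all_true {α : Type} (p : α → Bool) (l : List α)
    (h : ∀ a ∈ l, p a = true) : l.filter p = l :=
  List.filter_eq_self.mpr h

-- ===== VERDICT (by name: the statement is the Claim_ definition above) =====
theorem filter_reports_spec : Claim_equal_filter_reports := by
  intro reports it lp po _ _
  unfold Spec_filter_reports filter_reports filter_reports_alt
  cases hit : truthy it <;> cases hlp : truthy lp <;> cases po <;>
    simp only [Bool.false_eq_true, if_false, if_true, filter_and] <;>
    [ exact (filter_of_all_true _ _ (fun r _ => by simp [keepReport, hit, hlp])).symm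
    ; skip ; skip ; skip ; skip ; skip ; skip ; skip ] <;>
    exact (List.filter_congr (fun r _ => by simp [keepReport, hit, hlp])).symm.symm
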